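-- pv_equiv track=rewrite | github.com/Chaest/sd-webui-sc-loader | scripts/sc_loader/run.py | gen_couplings
-- ===== SOURCE A (Python) =====
-- def len_pn(lol, idx):
--     result = 1
--     for list_ in lol[:idx]:
--         result *= len(list_)
--     return result
--
-- def grow(list_, size):
--     return [
--         element
--         for element in list_
--         for _ in range(size)
--     ]
--
-- def gen_couplings(lol, full_length):
--     nlol = []
--     for idx, list_ in enumerate(lol):
--         len_so_far = len_pn(lol, idx)
--         growth = int(full_length / len(list_) / len_so_far)
--         grown_list = grow(list_, growth)
--         nlol.append(grown_list * len_so_far)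
--     return nlol
-- ===== SOURCE B (Python) =====
-- def gen_couplings(lol, full_length):
--     nlol = []
--     len_so_far = 1
--     for list_ in lol:
--         n = len(list_)
--         growth = int(full_length / n / len_so_far)
--         nlol.append([list_[(k // growth) % n] for k in range(growth * n * len_so_far)])
--         len_so_far *= n
--     return nlol
-- ===== Notes on version B (the rewrite author's own statement) =====
-- stated objective: alternative
-- what changed: Each output row is computed by a closed-form index formula row[k] = list_[(k // growth) % len(list_)] over one flat range(growth*n*len_so_far), instead of A's nested repetition (per-element replication in grow) followed by list tiling (* len_so_far) and the separate len_pn prefix-product helper; a running product replaces the per-index prefix scan.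
import Mathlib
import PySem

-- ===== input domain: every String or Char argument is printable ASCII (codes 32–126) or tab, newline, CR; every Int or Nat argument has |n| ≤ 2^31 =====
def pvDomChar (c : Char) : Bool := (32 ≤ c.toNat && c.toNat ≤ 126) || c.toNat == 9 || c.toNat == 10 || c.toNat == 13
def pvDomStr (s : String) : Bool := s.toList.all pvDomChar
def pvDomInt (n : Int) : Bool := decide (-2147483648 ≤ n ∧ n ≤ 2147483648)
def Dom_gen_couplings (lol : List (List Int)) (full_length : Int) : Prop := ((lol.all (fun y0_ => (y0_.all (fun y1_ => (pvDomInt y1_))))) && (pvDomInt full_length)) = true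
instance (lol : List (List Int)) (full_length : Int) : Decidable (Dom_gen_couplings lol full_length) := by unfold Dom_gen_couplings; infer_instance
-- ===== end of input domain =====

-- B replaces A's nested repetition + tiling + prefix-product helper by a closed-form index formula
-- per row over one flat range (objective: alternative); return values agree on Pre_, proved below.

-- ===== PORT A =====
def len_pn (lol : List (List Int)) (idx : Int) : Int :=
  -- result = 1; for list_ in lol[:idx]: result *= len(list_)
  (PySem.List.slice lol none (some idx)).foldl (fun result list_ => result * (list_.length : Int)) 1

def grow (list_ : List Int) (size : Int) : List Int :=
  -- [element for element in list_ for _ in range(size)]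
  list_.flatMap (fun element => (PySem.List.pyRange 0 size 1).map (fun _ => element))

def gen_couplings (lol : List (List Int)) (full_length : Int) : List (List Int) :=
  (PySem.List.enumerate lol 0).foldl
    (fun nlol p =>
      let len_so_far := len_pn lol p.1
      -- int(full_length / len(list_) / len_so_far): chained float true division then int() truncation;
      -- exact as truncated integer division on this domain (|full_length| ≤ 2^31 and Pre_ keeps the
      -- divisors below the float-overflow threshold, so the double rounding can never cross an integer)
      let growth := PySem.Int.truncdiv full_length ((p.2.length : Int) * len_so_far)
      let grown_list := grow p.2 growth
      -- nlol.append(grown_list * len_so_far)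
      nlol ++ [(List.replicate len_so_far.toNat grown_list).flatten])
    []

-- ===== PORT B =====
def gen_couplings_alt (lol : List (List Int)) (full_length : Int) : List (List Int) :=
  (lol.foldl
    (fun (acc : List (List Int) × Int) list_ =>
      let n : Int := list_.length
      -- growth = int(full_length / n / len_so_far)  (same float-division reading as in port A)
      let growth := PySem.Int.truncdiv full_length (n * acc.2)
      -- [list_[(k // growth) % n] for k in range(growth * n * len_so_far)]
      -- (the index (k // growth) % n is provably in range whenever the range is nonempty, so
      --  pyGetD with default 0 is exact: Python's list_[...] never raises here)
      (acc.1 ++ [(PySem.List.pyRange 0 (growth * n * acc.2) 1).map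
          (fun k => PySem.List.pyGetD list_ (PySem.Int.mod (PySem.Int.floordiv k growth) n) 0)],
       acc.2 * n))
    ([], 1)).1

-- ===== PRECONDITION & SPEC =====
-- Python A raises ZeroDivisionError whenever some inner list is empty, and OverflowError ("int too
-- large to convert to float") when the running prefix product of lengths reaches 2^1024 - 2^970 (the
-- exact int→float overflow threshold); B raises in exactly the same places, so Pre_ excludes only
-- raising inputs.
-- 2^1024 - 2^970, written as a decimal literal so the Decidable instance evaluates cheaply
def pvFloatOvf : Int := 179769313486231580793728971405303415079934132710037826936173778980444968292764750946649017977587207096330286416692887910946555547851940402630657488671505820681908902000708383676273854845817711531764475730270069855571366959622842914819860834936475292719074168444365510704342711559699508093042880177904174497792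

def Pre_gen_couplings (lol : List (List Int)) (full_length : Int) : Prop :=
  (∀ l ∈ lol, l ≠ []) ∧
  lol.dropLast.foldl (fun r l => r * (l.length : Int)) 1 < pvFloatOvf

instance (lol : List (List Int)) (full_length : Int) : Decidable (Pre_gen_couplings lol full_length) := by
  unfold Pre_gen_couplings; infer_instance

def pvWitness_gen_couplings : List (List Int) × Int := ([[1, 2], [3]], 6)

def Spec_gen_couplings (lol : List (List Int)) (full_length : Int) (out : List (List Int)) : Prop :=
  out = gen_couplings_alt lol full_length
instance (lol : List (List Int)) (full_length : Int) (out : List (List Int)) : Decidable (Spec_gen_couplings lol full_length out) := by unfold Spec_gen_couplings; infer_instance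

-- ===== CLAIM (what is proved, stated in full; the proofs are below) =====
def Claim_equal_gen_couplings : Prop := ∀ (lol : List (List Int)) (full_length : Int), Dom_gen_couplings lol full_length → Pre_gen_couplings lol full_length → Spec_gen_couplings lol full_length (gen_couplings lol full_length)

-- ===== LEMMAS AND PROOFS =====

-- A's grow is flatMap of replicates
lemma grow_eq (xs : List Int) (g : Int) :
    grow xs g = xs.flatMap (fun element => List.replicate g.toNat element) := by
  unfold grow
  refine List.flatMap_congr ?_ ; intro e _
  rw [PySem.List.pyRange_one]
  simp [Function.comp_def, List.map_const']

-- tiling a list P times is one flat range with a modular index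
lemma flatten_replicate_eq (L : List Int) (P : Nat) :
    (List.replicate P L).flatten
      = (List.range (P * L.length)).map (fun k => L.getD (k % L.length) 0) := by
  induction P with
  | zero => simp
  | succ P ih =>
    rw [List.replicate_succ, List.flatten_cons, ih, Nat.succ_mul, Nat.add_comm,
        List.range_add, List.map_append]
    congr 1
    · rcases L.eq_nil_or_concat with rfl | _
      · simp
      · refine List.ext_getElem (by simp) ?_
        intro i h1 h2
        have hi : i < L.length := by simpa using h1
        simp [Nat.mod_eq_of_lt hi, List.getD_eq_getElem?_getD, List.getElem?_eq_getElem hi]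
    · rw [List.map_map]
      refine List.map_congr_left ?_
      intro k _
      simp [Function.comp_def, Nat.add_mod_left]

-- indexing into flatMap-of-replicates is division of the index
lemma flatMap_replicate_getD (xs : List Int) (G : Nat) :
    ∀ i, i < xs.length * G →
      (xs.flatMap (fun e => List.replicate G e)).getD i 0 = xs.getD (i / G) 0 := by
  induction xs with
  | nil => intro i h; simp at h
  | cons x t ih =>
    intro i h
    rw [List.flatMap_cons]
    by_cases hi : i < G
    · rw [List.getD_eq_getElem?_getD,
          List.getElem?_append_left (l₁ := List.replicate G x) (by simpa using hi)]
      simp [List.getElem?_replicate, hi, Nat.div_eq_of_lt hi]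
    · push_neg at hi
      have hG : 0 < G := by
        rcases Nat.eq_zero_or_pos G with rfl | h'
        · omega
        · exact h'
      have h1 : i - G < t.length * G := by
        simp [Nat.succ_mul] at h; omega
      have hsplit : ((List.replicate G x) ++ t.flatMap fun e => List.replicate G e).getD i 0
          = (t.flatMap fun e => List.replicate G e).getD (i - G) 0 := by
        rw [List.getD_eq_getElem?_getD,
            List.getElem?_append_right (l₁ := List.replicate G x) (by simpa using hi)]
        simp [List.getD_eq_getElem?_getD]
      rw [hsplit, ih _ h1]
      have hdiv : i / G = (i - G) / G + 1 := by
        rcases Nat.exists_eq_add_of_le hi with ⟨j, rfl⟩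
        simp [Nat.add_comm G j, Nat.add_div_right _ hG]
      rw [hdiv, List.getD_cons_succ]

-- the row correspondence: A's replicate-of-grow flatten = B's closed-form indexed range
lemma row_eq (xs : List Int) (p g : Int) (hxs : xs ≠ []) (hp : 0 < p) :
    (List.replicate p.toNat (grow xs g)).flatten
      = (PySem.List.pyRange 0 (g * (xs.length : Int) * p) 1).map
          (fun k => PySem.List.pyGetD xs
            (PySem.Int.mod (PySem.Int.floordiv k g) (xs.length : Int)) 0) := by
  have hN : 0 < xs.length := List.length_pos_iff.mpr hxs
  by_cases hg : g ≤ 0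
  · -- growth ≤ 0: both rows are empty
    have h1 : grow xs g = [] := by
      unfold grow
      rw [PySem.List.pyRange_one_eq_nil hg]
      simp
    have h2 : g * (xs.length : Int) * p ≤ 0 := by
      have : (0:Int) ≤ (xs.length : Int) * p :=
        mul_nonneg (by exact_mod_cast Nat.zero_le _) (le_of_lt hp)
      calc g * (xs.length : Int) * p = g * ((xs.length : Int) * p) := by ring
        _ ≤ 0 := mul_nonpos_of_nonpos_of_nonneg hg this
    rw [h1, PySem.List.pyRange_one_eq_nil (by omega)]
    simp
  · push_neg at hg
    obtain ⟨G, rfl⟩ : ∃ G : Nat, g = (G : Int) := ⟨g.toNat, by omega⟩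
    obtain ⟨P, rfl⟩ : ∃ P : Nat, p = (P : Int) := ⟨p.toNat, by omega⟩
    have hGpos : 0 < G := by exact_mod_cast hg
    have hPpos : 0 < P := by exact_mod_cast hp
    have hL : (xs.flatMap (fun e => List.replicate G e)).length = xs.length * G := by
      rw [List.length_flatMap]
      simp [List.map_const', List.sum_replicate, smul_eq_mul]
    rw [grow_eq, flatten_replicate_eq]
    simp only [Int.toNat_natCast]
    rw [hL]
    have htot : ((G : Int) * (xs.length : Int) * (P : Int) - 0) = ((G * xs.length * P : Nat) : Int) := by
      push_cast; ring
    rw [PySem.List.pyRange_one, htot, Int.toNat_natCast, List.map_map]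
    have hcount : P * (xs.length * G) = G * xs.length * P := by ring
    rw [hcount]
    refine List.map_congr_left ?_
    intro k hk
    have hmodlt : k % (xs.length * G) < xs.length * G := Nat.mod_lt _ (Nat.mul_pos hN hGpos)
    have hidx : k % (xs.length * G) / G = k / G % xs.length := by
      rw [Nat.mul_comm xs.length G]
      exact Nat.mod_mul_right_div_self k G xs.length
    rw [flatMap_replicate_getD xs G _ hmodlt, hidx]
    have hfd : PySem.Int.floordiv ((0 : Int) + (k : Nat)) (G : Int) = ((k / G : Nat) : Int) := by
      simpa using PySem.Int.floordiv_natCast k G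
    have hmd : PySem.Int.mod ((k / G : Nat) : Int) ((xs.length : Nat) : Int)
        = ((k / G % xs.length : Nat) : Int) := PySem.Int.mod_natCast _ _
    simp only [Function.comp_def, hfd, hmd, PySem.List.pyGetD_natCast]

-- the generalised loop correspondence
lemma loop_eq (full_length : Int) (suf : List (List Int)) :
    ∀ (pre : List (List Int)) (nlol : List (List Int)),
    (∀ l ∈ suf, l ≠ []) →
    0 < pre.foldl (fun r l => r * (l.length : Int)) 1 →
    (PySem.List.enumerate suf (pre.length : Int)).foldl
      (fun nlol p =>
        let len_so_far := len_pn (pre ++ suf) p.1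
        let growth := PySem.Int.truncdiv full_length ((p.2.length : Int) * len_so_far)
        let grown_list := grow p.2 growth
        nlol ++ [(List.replicate len_so_far.toNat grown_list).flatten])
      nlol
    = (suf.foldl
        (fun (acc : List (List Int) × Int) list_ =>
          let n : Int := list_.length
          let growth := PySem.Int.truncdiv full_length (n * acc.2)
          (acc.1 ++ [(PySem.List.pyRange 0 (growth * n * acc.2) 1).map
              (fun k => PySem.List.pyGetD list_ (PySem.Int.mod (PySem.Int.floordiv k growth) n) 0)],
           acc.2 * n))
        (nlol, pre.foldl (fun r l => r * (l.length : Int)) 1)).1 := by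
  induction suf with
  | nil => intro pre nlol _ _; simp [PySem.List.enumerate_nil]
  | cons x t ih =>
    intro pre nlol hne hP
    rw [PySem.List.enumerate_cons, List.foldl_cons, List.foldl_cons]
    have hlp : len_pn (pre ++ x :: t) (pre.length : Int)
        = pre.foldl (fun r l => r * (l.length : Int)) 1 := by
      unfold len_pn
      rw [PySem.List.slice_to_natCast, List.take_left]
    have hpre : pre ++ x :: t = (pre ++ [x]) ++ t := by simp
    have hlen : ((pre.length : Int) + 1) = (((pre ++ [x]).length : Nat) : Int) := by simp
    have hprod : pre.foldl (fun r l => r * (l.length : Int)) 1 * (x.length : Int)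
        = (pre ++ [x]).foldl (fun r l => r * (l.length : Int)) 1 := by
      rw [List.foldl_append]; rfl
    have hx : x ≠ [] := hne x List.mem_cons_self
    simp only [hlp]
    rw [row_eq x _ _ hx hP, mul_comm ((x.length : Int))
          (pre.foldl (fun r l => r * (l.length : Int)) 1)]
    · rw [hpre, hlen, hprod]
      refine ih (pre ++ [x]) _ (fun l hl => hne l (List.mem_cons_of_mem _ hl)) ?_
      rw [← hprod]
      have : (0:Int) < (x.length : Int) := by
        exact_mod_cast List.length_pos_iff.mpr hx
      positivity

-- ===== VERDICT (by name: the statement is the Claim_ definition above) =====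
theorem gen_couplings_spec : Claim_equal_gen_couplings := by
  intro lol full_length _ hpre
  unfold Spec_gen_couplings gen_couplings gen_couplings_alt
  have h := loop_eq full_length lol [] [] hpre.1 (by simp)
  simpa using h
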